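-- pv_equiv track=rewrite | github.com/Dest1n640/Python | Homework/HomeworkStr/Number1.py | count_suspect_words
-- ===== SOURCE A (Python) =====
-- def are_one_char_diff(str1, str2):
--     if str1 == str2:
--         return False
--
--     if len(str1) != len(str2):
--         return False
--
--     count_diff = 0
--
--     for i in range(len(str1)):
--         if str1[i] != str2[i]:
--             count_diff += 1
--             if count_diff > 1:
--                 return False
--
--     return count_diff == 1
--
-- def count_suspect_words(gods, suspects):
--     result = []
--
--     for god in gods:
--         count = 0
--         for suspect in suspects:
--             if are_one_char_diff(god, suspect):
--                 count += 1
--         result.append(count)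
--
--     return result
-- ===== SOURCE B (Python) =====
-- def count_suspect_words(gods, suspects):
--     # Wildcard-deletion index: for each suspect, register the key (i, s without char i)
--     # once per position; a suspect at Hamming distance <= 1 (same length) from a god shares
--     # such a key; each exact duplicate of the god is counted len(god) times, so subtract them.
--     pat = {}
--     exact = {}
--     for s in suspects:
--         exact[s] = exact.get(s, 0) + 1
--         for i in range(len(s)):
--             k = (i, s[:i] + s[i+1:])
--             pat[k] = pat.get(k, 0) + 1
--     result = []
--     for g in gods:
--         total = 0
--         for i in range(len(g)):
--             total += pat.get((i, g[:i] + g[i+1:]), 0)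
--         result.append(total - len(g) * exact.get(g, 0))
--     return result
-- ===== Notes on version B (the rewrite author's own statement) =====
-- stated objective: faster
-- what changed: B builds a wildcard-deletion index (key = (i, suspect with char i removed) -> count) plus an exact-duplicate counter in one pass over suspects, then answers each god with len(god) dict lookups and subtracts len(god) times its exact-match count, instead of A's per-god scan of every suspect with a character-by-character comparison.
import Mathlib
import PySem

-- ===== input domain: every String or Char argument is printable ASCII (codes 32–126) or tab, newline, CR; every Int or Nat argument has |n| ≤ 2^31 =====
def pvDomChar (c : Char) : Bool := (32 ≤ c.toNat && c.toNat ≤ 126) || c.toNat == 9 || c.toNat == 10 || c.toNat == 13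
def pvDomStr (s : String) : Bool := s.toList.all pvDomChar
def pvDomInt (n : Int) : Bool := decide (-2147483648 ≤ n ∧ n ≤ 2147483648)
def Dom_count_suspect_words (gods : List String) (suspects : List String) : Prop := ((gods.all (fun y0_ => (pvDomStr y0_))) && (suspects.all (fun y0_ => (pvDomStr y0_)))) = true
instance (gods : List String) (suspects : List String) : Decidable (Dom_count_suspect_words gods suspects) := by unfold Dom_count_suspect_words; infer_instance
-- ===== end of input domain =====

-- B replaces A's per-god scan of all suspects by a wildcard-deletion index built once over
-- the suspects (key = (i, word with character i removed)), answered with len(god) lookups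
-- minus the exact-duplicate contribution (objective: faster).

-- ===== PORT A =====
def are_one_char_diff_go (str1 str2 : String) (idxs : List Int) (cnt : Int) : Bool :=
  match idxs with
  | [] => cnt == 1
  | i :: rest =>
    if PySem.Str.pyGet? str1 i ≠ PySem.Str.pyGet? str2 i then
      if cnt + 1 > 1 then false else are_one_char_diff_go str1 str2 rest (cnt + 1)
    else are_one_char_diff_go str1 str2 rest cnt

def are_one_char_diff (str1 str2 : String) : Bool :=
  if str1 == str2 then false
  else if PySem.Str.len str1 ≠ PySem.Str.len str2 then false
  else are_one_char_diff_go str1 str2 (PySem.List.pyRange 0 (PySem.Str.len str1) 1) 0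

def count_suspect_words (gods : List String) (suspects : List String) : List Int :=
  gods.foldl (fun result god =>
    result ++ [suspects.foldl (fun count suspect =>
      if are_one_char_diff god suspect then count + 1 else count) 0]) []

-- ===== PORT B =====
-- Python key (i, s[:i] + s[i+1:]) : tuple of int and string; the string component is
-- represented by its code points (List Char), exact for Python string equality.
def csw_key (s : String) (i : Int) : Int × List Char :=
  (i, PySem.List.slice s.toList none (some i) ++ PySem.List.slice s.toList (some (i + 1)) none)

-- the single pass over suspects: exact-duplicate counter and wildcard-deletion counter
def csw_build (suspects : List String) :
    PySem.Dict String Int × PySem.Dict (Int × List Char) Int :=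
  suspects.foldl (fun st s =>
    (st.1.insert s (st.1.getD s 0 + 1),
     (PySem.List.pyRange 0 (PySem.Str.len s) 1).foldl
       (fun d i => d.insert (csw_key s i) (d.getD (csw_key s i) 0 + 1)) st.2))
    (PySem.Dict.empty, PySem.Dict.empty)

def count_suspect_words_alt (gods : List String) (suspects : List String) : List Int :=
  let st := csw_build suspects
  gods.foldl (fun result g =>
    result ++ [((PySem.List.pyRange 0 (PySem.Str.len g) 1).foldl
        (fun t i => t + st.2.getD (csw_key g i) 0) 0)
      - PySem.Str.len g * st.1.getD g 0]) []

-- ===== PRECONDITION & SPEC =====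
def Spec_count_suspect_words (gods : List String) (suspects : List String) (out : List Int) : Prop := out = count_suspect_words_alt gods suspects
instance (gods : List String) (suspects : List String) (out : List Int) : Decidable (Spec_count_suspect_words gods suspects out) := by unfold Spec_count_suspect_words; infer_instance

-- ===== CLAIM (what is proved, stated in full; the proofs are below) =====
def Claim_equal_count_suspect_words : Prop := ∀ (gods : List String) (suspects : List String), Dom_count_suspect_words gods suspects → Spec_count_suspect_words gods suspects (count_suspect_words gods suspects)

-- ===== LEMMAS AND PROOFS =====

-- deleting position j from a word, the proof-side view of csw_key's second component
def delAt (u : List Char) (j : Nat) : List Char := u.take j ++ u.drop (j + 1)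

theorem csw_key_natCast (s : String) (j : Nat) :
    csw_key s (j : Int) = ((j : Int), delAt s.toList j) := by
  unfold csw_key delAt
  rw [PySem.List.slice_to _ (by positivity), PySem.List.slice_from _ (by positivity)]
  norm_num

-- the key list a suspect contributes
def keysOf (s : String) : List (Int × List Char) :=
  (PySem.List.pyRange 0 (PySem.Str.len s) 1).map (csw_key s)

theorem keysOf_eq (s : String) :
    keysOf s = (List.range s.toList.length).map (fun (j : Nat) => ((j : Int), delAt s.toList j)) := by
  unfold keysOf
  rw [PySem.Str.len_eq, PySem.List.pyRange_zero_natCast, List.map_map]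
  exact List.map_congr_left (fun j _ => csw_key_natCast s j)

-- ---- generic fold/sum lemmas ----

theorem foldl_prod_split {α β γ : Type} (l : List α) (f : β → α → β) (g : γ → α → γ)
    (b : β) (c : γ) :
    l.foldl (fun st x => (f st.1 x, g st.2 x)) (b, c) = (l.foldl f b, l.foldl g c) := by
  induction l generalizing b c with
  | nil => rfl
  | cons x t ih => simp [List.foldl_cons, ih]

theorem foldl_count {α : Type} (l : List α) (p : α → Bool) (a : Int) :
    l.foldl (fun c x => if p x then c + 1 else c) a
      = a + (l.map (fun x => if p x then (1 : Int) else 0)).sum := by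
  induction l generalizing a with
  | nil => simp
  | cons x t ih =>
    simp only [List.foldl_cons, List.map_cons, List.sum_cons, ih]
    by_cases h : p x
    · simp [h]; ring
    · simp [h]

theorem sum_map_sub_int {α : Type} (l : List α) (f g : α → Int) :
    (l.map (fun x => f x - g x)).sum = (l.map f).sum - (l.map g).sum := by
  induction l with
  | nil => simp
  | cons x t ih => simp [ih]; ring

theorem sum_swap_int {α β : Type} (l : List α) (m : List β) (f : α → β → Int) :
    (l.map (fun a => (m.map (f a)).sum)).sum = (m.map (fun b => (l.map (fun a => f a b)).sum)).sum := by
  induction l with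
  | nil => simp
  | cons x t ih =>
    simp only [List.map_cons, List.sum_cons, ih, ← PySem.List.sum_map_add_int]

theorem count_flatMap {α κ : Type} [BEq κ] (l : List α) (f : α → List κ) (v : κ) :
    ((l.flatMap f).count v : Int) = (l.map (fun a => ((f a).count v : Int))).sum := by
  induction l with
  | nil => simp
  | cons x t ih => simp [List.count_append, ih]

theorem count_as_sum {α : Type} [BEq α] [LawfulBEq α] [DecidableEq α] (l : List α) (v : α) :
    ((l.count v : Int)) = (l.map (fun x => if x = v then (1 : Int) else 0)).sum := by
  induction l with
  | nil => simp
  | cons x t ih =>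
    rw [List.count_cons, List.map_cons, List.sum_cons]
    by_cases h : x = v
    · rw [if_pos (beq_iff_eq.mpr h), if_pos h]
      push_cast
      rw [ih]
      ring
    · rw [if_neg (by simpa using h), if_neg h]
      push_cast
      rw [ih]
      ring

theorem sum_ones (n : Nat) : ((List.range n).map (fun _ => (1 : Int))).sum = n := by
  induction n with
  | zero => simp
  | succ n ih =>
    rw [List.range_succ, List.map_append, List.sum_append, ih]
    push_cast
    simp

theorem sum_zeros {α : Type} (l : List α) : (l.map (fun _ => (0 : Int))).sum = 0 := by
  induction l with
  | nil => simp
  | cons x t ih => simp [ih]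

theorem sum_point (n p : Nat) :
    (((List.range n).map (fun j => if j = p then (1 : Int) else 0)).sum)
      = if p < n then 1 else 0 := by
  induction n with
  | zero => simp
  | succ n ih =>
    rw [List.range_succ, List.map_append, List.sum_append, ih]
    by_cases h : p = n
    · subst h; simp
    · have hnp : ¬ n = p := fun hc => h hc.symm
      rcases Nat.lt_or_ge p n with h' | h'
      · simp [hnp, h', Nat.lt_succ_of_lt h']
      · have h1 : ¬ p < n := by omega
        have h2 : ¬ p < n + 1 := by omega
        simp [hnp, h1, h2]

-- ---- dict lemmas ----

theorem getD_insert_inc {κ : Type} [BEq κ] [LawfulBEq κ] (l : List κ)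
    (d : PySem.Dict κ Int) (v : κ) :
    (l.foldl (fun d x => d.insert x (d.getD x 0 + 1)) d).getD v 0
      = d.getD v 0 + l.count v := by
  induction l generalizing d with
  | nil => simp
  | cons x t ih =>
    rw [List.foldl_cons, ih, List.count_cons]
    by_cases h : v = x
    · subst h
      rw [PySem.Dict.getD_insert_self, if_pos (beq_iff_eq.mpr rfl)]
      push_cast
      ring
    · rw [PySem.Dict.getD_insert_of_ne _ _ _ h,
        if_neg (by simpa using fun hc => h hc.symm)]
      push_cast
      ring

theorem csw_build_eq (suspects : List String) :
    csw_build suspects =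
      (suspects.foldl (fun d s => d.insert s (d.getD s 0 + 1)) PySem.Dict.empty,
       suspects.foldl (fun d s => (PySem.List.pyRange 0 (PySem.Str.len s) 1).foldl
         (fun d i => d.insert (csw_key s i) (d.getD (csw_key s i) 0 + 1)) d) PySem.Dict.empty) := by
  unfold csw_build
  exact foldl_prod_split suspects
    (fun (d : PySem.Dict String Int) s => d.insert s (d.getD s 0 + 1))
    (fun (d : PySem.Dict (Int × List Char) Int) s =>
      (PySem.List.pyRange 0 (PySem.Str.len s) 1).foldl
        (fun d i => d.insert (csw_key s i) (d.getD (csw_key s i) 0 + 1)) d)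
    PySem.Dict.empty PySem.Dict.empty

theorem csw_build_fst (suspects : List String) (g : String) :
    (csw_build suspects).1.getD g 0 = suspects.count g := by
  rw [csw_build_eq]
  show (suspects.foldl (fun (d : PySem.Dict String Int) s => d.insert s (d.getD s 0 + 1)) PySem.Dict.empty).getD g 0 = _
  rw [getD_insert_inc]
  have h0 : (PySem.Dict.empty : PySem.Dict String Int).getD g 0 = 0 := rfl
  rw [h0, zero_add]

theorem csw_build_snd (suspects : List String) (v : Int × List Char) :
    (csw_build suspects).2.getD v 0 = ((suspects.flatMap keysOf).count v : Int) := by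
  rw [csw_build_eq]
  show (suspects.foldl (fun (d : PySem.Dict (Int × List Char) Int) s => (PySem.List.pyRange 0 (PySem.Str.len s) 1).foldl
    (fun d i => d.insert (csw_key s i) (d.getD (csw_key s i) 0 + 1)) d) PySem.Dict.empty).getD v 0 = _
  have h : ∀ (l : List String) (d : PySem.Dict (Int × List Char) Int),
      (l.foldl (fun d s => (PySem.List.pyRange 0 (PySem.Str.len s) 1).foldl
        (fun d i => d.insert (csw_key s i) (d.getD (csw_key s i) 0 + 1)) d) d).getD v 0
      = d.getD v 0 + ((l.flatMap keysOf).count v : Int) := by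
    intro l
    induction l with
    | nil => simp
    | cons s t ih =>
      intro d
      rw [List.foldl_cons, ih]
      have hin : (PySem.List.pyRange 0 (PySem.Str.len s) 1).foldl
          (fun d i => d.insert (csw_key s i) (d.getD (csw_key s i) 0 + 1)) d
          = (keysOf s).foldl (fun d k => d.insert k (d.getD k 0 + 1)) d := by
        unfold keysOf
        rw [List.foldl_map]
      rw [hin, getD_insert_inc]
      simp only [List.flatMap_cons, List.count_append]
      push_cast
      ring
  have h0 : (PySem.Dict.empty : PySem.Dict (Int × List Char) Int).getD v 0 = 0 := rfl
  rw [h suspects PySem.Dict.empty, h0, zero_add]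

-- ---- A's early-exit pair test, characterised ----

theorem ind_sum_nonneg (god s : String) (idxs : List Int) :
    0 ≤ (idxs.map (fun i => if PySem.Str.pyGet? god i ≠ PySem.Str.pyGet? s i then (1 : Int) else 0)).sum := by
  apply List.sum_nonneg
  intro x hx
  simp only [List.mem_map] at hx
  obtain ⟨i, _, rfl⟩ := hx
  split <;> omega

theorem go_eq (god s : String) (idxs : List Int) (cnt : Int) (h : 0 ≤ cnt) :
    are_one_char_diff_go god s idxs cnt =
      (cnt + (idxs.map (fun i => if PySem.Str.pyGet? god i ≠ PySem.Str.pyGet? s i then (1 : Int) else 0)).sum == 1) := by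
  induction idxs generalizing cnt with
  | nil => simp [are_one_char_diff_go]
  | cons i rest ih =>
    have hrest := ind_sum_nonneg god s rest
    rw [List.map_cons, List.sum_cons]
    have hstep : are_one_char_diff_go god s (i :: rest) cnt =
        if PySem.Str.pyGet? god i ≠ PySem.Str.pyGet? s i then
          (if cnt + 1 > 1 then false else are_one_char_diff_go god s rest (cnt + 1))
        else are_one_char_diff_go god s rest cnt := rfl
    by_cases hne : PySem.Str.pyGet? god i ≠ PySem.Str.pyGet? s i
    · rw [hstep, if_pos hne, if_pos hne]
      by_cases hc : cnt + 1 > 1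
      · rw [if_pos hc]
        symm
        rw [beq_eq_false_iff_ne]
        omega
      · rw [if_neg hc, ih (cnt + 1) (by omega)]
        congr 1
        omega
    · rw [hstep, if_neg hne, if_neg hne, ih cnt h]
      congr 1
      omega

-- number of mismatching positions, over Nat indices
def mismCount (u v : List Char) (n : Nat) : Int :=
  ((List.range n).map (fun j => if u[j]? ≠ v[j]? then (1 : Int) else 0)).sum

theorem pointwise (god s : String) :
    are_one_char_diff god s =
      ((PySem.Str.len s == PySem.Str.len god)
        && (mismCount god.toList s.toList god.toList.length == 1)) := by
  unfold are_one_char_diff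
  have hsum : (PySem.List.pyRange 0 (PySem.Str.len god) 1).map
        (fun i => if PySem.Str.pyGet? god i ≠ PySem.Str.pyGet? s i then (1 : Int) else 0)
      = (List.range god.toList.length).map
        (fun j => if god.toList[j]? ≠ s.toList[j]? then (1 : Int) else 0) := by
    rw [PySem.Str.len_eq, PySem.List.pyRange_zero_natCast, List.map_map]
    exact List.map_congr_left (fun j _ => by
      simp [Function.comp, PySem.Str.pyGet?_natCast])
  by_cases heq : god == s
  · have hgs : god = s := eq_of_beq heq
    subst hgs
    rw [if_pos heq]
    unfold mismCount
    simp
  · rw [if_neg (by simpa using heq)]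
    by_cases hlen : PySem.Str.len god = PySem.Str.len s
    · have ht : (PySem.Str.len s == PySem.Str.len god) = true := by
        simp only [beq_iff_eq]; exact hlen.symm
      rw [if_neg (fun hc => hc hlen), ht, Bool.true_and,
        go_eq god s _ 0 le_rfl, hsum]
      unfold mismCount
      congr 1
      omega
    · have hf : (PySem.Str.len s == PySem.Str.len god) = false := by
        simp only [beq_eq_false_iff_ne, ne_eq]
        intro hc; exact hlen hc.symm
      rw [if_pos hlen, hf, Bool.false_and]

-- ---- deletion equality vs pointwise equality ----

theorem delAt_length (u : List Char) (j : Nat) (h : j < u.length) :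
    (delAt u j).length = u.length - 1 := by
  unfold delAt
  simp [List.length_take, List.length_drop]
  omega

theorem delAt_eq_iff (u v : List Char) (n j : Nat) (hu : u.length = n) (hv : v.length = n)
    (hj : j < n) :
    delAt v j = delAt u j ↔ ∀ k, k ≠ j → v[k]? = u[k]? := by
  unfold delAt
  constructor
  · intro h
    have hlen : (v.take j).length = (u.take j).length := by
      simp [List.length_take]; omega
    obtain ⟨h1, h2⟩ := List.append_inj h hlen
    intro k hk
    rcases Nat.lt_or_ge k j with hkj | hkj
    · have := congrArg (fun l => l[k]?) h1
      simpa [List.getElem?_take, hkj] using this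
    · have hkj' : j + 1 ≤ k := by omega
      have := congrArg (fun l => l[k - (j + 1)]?) h2
      simp only [List.getElem?_drop] at this
      rwa [Nat.add_sub_cancel' hkj'] at this
  · intro h
    have h1 : v.take j = u.take j := by
      apply List.ext_getElem?
      intro k
      rcases Nat.lt_or_ge k j with hkj | hkj
      · rw [List.getElem?_take_of_lt hkj, List.getElem?_take_of_lt hkj]
        exact h k (by omega)
      · rw [List.getElem?_eq_none (by simp [List.length_take]; omega),
          List.getElem?_eq_none (by simp [List.length_take]; omega)]
    have h2 : v.drop (j + 1) = u.drop (j + 1) := by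
      apply List.ext_getElem?
      intro k
      rw [List.getElem?_drop, List.getElem?_drop]
      exact h (j + 1 + k) (by omega)
    rw [h1, h2]

-- ---- per-suspect identity ----

theorem count_keymap (f : Nat → List Char) (m i : Nat) (d : List Char) :
    (((List.range m).map (fun (j : Nat) => ((j : Int), f j))).count ((i : Int), d))
      = if i < m ∧ f i = d then 1 else 0 := by
  induction m with
  | zero => simp
  | succ m ih =>
    rw [List.range_succ, List.map_append, List.count_append, ih]
    simp only [List.map_cons, List.map_nil]
    by_cases hm : i = m
    · subst hm
      by_cases hd : f i = d
      · simp [hd, List.count_singleton, Nat.lt_irrefl, Nat.lt_succ_self]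
      · have : ¬ (((i : Int), f i) == ((i : Int), d)) := by
          simp [hd]
        simp [List.count_singleton, hd, Nat.lt_irrefl, Nat.lt_succ_self, this]
    · have hne : ¬ (((m : Int), f m) == ((i : Int), d)) = true := by
        simp only [beq_iff_eq, Prod.mk.injEq, not_and]
        intro hc
        exact absurd (by exact_mod_cast hc.symm : i = m) hm
      have hbf : (((m : Int), f m) == ((i : Int), d)) = false :=
        Bool.eq_false_iff.mpr (fun hc => hne hc)
      rcases Nat.lt_or_ge i m with h' | h'
      · simp [List.count_singleton, hbf, h', Nat.lt_succ_of_lt h']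
      · have h1 : ¬ i < m := by omega
        have h2 : ¬ i < m + 1 := by omega
        simp [List.count_singleton, hbf, h1, h2]

-- the combinatorial heart, over plain lists: for words u (the god) and v (a suspect),
--   Σ_{j<|u|} [j < |v| ∧ delAt v j = delAt u j]  -  |u|·[v = u]
--     =  [same length ∧ exactly one mismatching position]
theorem del_count_identity (u v : List Char) (n m : Nat) (hn : u.length = n) (hm : v.length = m) :
    ((List.range n).map (fun (j : Nat) => if j < m ∧ delAt v j = delAt u j then (1 : Int) else 0)).sum
      - (n : Int) * (if v = u then 1 else 0)
      = if (((m : Int) == (n : Int)) && (mismCount u v n == 1)) then 1 else 0 := by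
  by_cases hlen : m = n
  · subst hlen
    rw [show (((m : Int)) == ((m : Int))) = true from by simp, Bool.true_and]
    have hmem : ∀ j, j ∈ (List.range m).filter (fun j => !(u[j]? == v[j]?))
        ↔ (j < m ∧ u[j]? ≠ v[j]?) := by
      intro j
      simp [List.mem_filter]
    have hmc : mismCount u v m
        = ((((List.range m).filter (fun j => !(u[j]? == v[j]?))).length : Nat) : Int) := by
      unfold mismCount
      have hcg : ∀ j ∈ List.range m,
          (if u[j]? ≠ v[j]? then (1 : Int) else 0)
            = if (!(u[j]? == v[j]?)) = true then 1 else 0 := by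
        intro j _
        by_cases h : u[j]? = v[j]? <;> simp [h]
      rw [List.map_congr_left hcg, PySem.List.sum_map_ite_one_zero,
        List.countP_eq_length_filter]
    cases hFe : (List.range m).filter (fun j => !(u[j]? == v[j]?)) with
    | nil =>
      rw [hFe] at hmc hmem
      have hall : ∀ (k : Nat), v[k]? = u[k]? := by
        intro k
        by_cases hk : k < m
        · by_contra hc
          have hkF : k ∈ ([] : List Nat) := (hmem k).mpr ⟨hk, fun h => hc h.symm⟩
          simp at hkF
        · have e1 : v[k]? = none := List.getElem?_eq_none (by omega)
          have e2 : u[k]? = none := List.getElem?_eq_none (by omega)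
          rw [e1, e2]
      have huv : v = u := List.ext_getElem? hall
      subst huv
      rw [hmc]
      have h1 : ∀ j ∈ List.range m,
          (if j < m ∧ delAt v j = delAt v j then (1 : Int) else 0) = 1 := by
        intro j hj
        simp [List.mem_range.mp hj]
      rw [List.map_congr_left h1, sum_ones]
      simp
    | cons p F' =>
      cases F' with
      | nil =>
        rw [hFe] at hmc hmem
        have hp : p < m ∧ u[p]? ≠ v[p]? := (hmem p).mp (by simp)
        have hothers : ∀ k, k < m → k ≠ p → u[k]? = v[k]? := by
          intro k hk hkp
          by_contra hc
          have hkF : k ∈ [p] := (hmem k).mpr ⟨hk, hc⟩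
          simp at hkF
          exact hkp hkF
        have hne : v ≠ u := fun hc => hp.2 (by rw [hc])
        have h1 : ∀ j ∈ List.range m,
            (if j < m ∧ delAt v j = delAt u j then (1 : Int) else 0)
              = if j = p then 1 else 0 := by
          intro j hj
          have hjm : j < m := List.mem_range.mp hj
          by_cases hjp : j = p
          · subst hjp
            have hde : delAt v j = delAt u j := by
              rw [delAt_eq_iff u v m j hn hm hjm]
              intro k hk
              by_cases hkm : k < m
              · exact (hothers k hkm hk).symm
              · have e1 : v[k]? = none := List.getElem?_eq_none (by omega)
                have e2 : u[k]? = none := List.getElem?_eq_none (by omega)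
                rw [e1, e2]
            simp [hjm, hde]
          · have hde : ¬ delAt v j = delAt u j := by
              rw [delAt_eq_iff u v m j hn hm hjm]
              intro hc
              exact hp.2 ((hc p (fun h => hjp h.symm)).symm)
            simp [hde, hjp]
        rw [List.map_congr_left h1, sum_point, if_pos hp.1, hmc]
        simp [hne]
      | cons q rest =>
        rw [hFe] at hmc hmem
        have hp : p < m ∧ u[p]? ≠ v[p]? := (hmem p).mp (by simp)
        have hq : q < m ∧ u[q]? ≠ v[q]? := (hmem q).mp (by simp)
        have hpq : p ≠ q := by
          have hnd : ((List.range m).filter (fun j => !(u[j]? == v[j]?))).Nodup :=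
            List.Nodup.filter _ (List.nodup_range)
          rw [hFe] at hnd
          intro hc
          subst hc
          simp at hnd
        have hne : v ≠ u := fun hc => hp.2 (by rw [hc])
        have h1 : ∀ j ∈ List.range m,
            (if j < m ∧ delAt v j = delAt u j then (1 : Int) else 0) = 0 := by
          intro j hj
          have hjm : j < m := List.mem_range.mp hj
          have hde : ¬ delAt v j = delAt u j := by
            rw [delAt_eq_iff u v m j hn hm hjm]
            intro hc
            rcases eq_or_ne j p with rfl | hjp
            · exact hq.2 ((hc q (Ne.symm hpq)).symm)
            · exact hp.2 ((hc p (Ne.symm hjp)).symm)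
          simp [hde]
        rw [List.map_congr_left h1, sum_zeros, hmc]
        have hlen1 : ((((p :: q :: rest).length : Nat) : Int) == 1) = false := by
          refine beq_eq_false_iff_ne.mpr ?_
          simp only [List.length_cons]
          push_cast
          omega
        rw [hlen1]
        simp [hne]
  · have hb : (((m : Int)) == ((n : Int))) = false :=
      beq_eq_false_iff_ne.mpr (by exact_mod_cast hlen)
    rw [hb, Bool.false_and]
    have hne : v ≠ u := fun hc => hlen (by rw [← hm, hc, hn])
    have h1 : ∀ j ∈ List.range n,
        (if j < m ∧ delAt v j = delAt u j then (1 : Int) else 0) = 0 := by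
      intro j hj
      have hjn : j < n := List.mem_range.mp hj
      by_cases hjm : j < m
      · have hde : ¬ delAt v j = delAt u j := by
          intro hc
          have l1 := delAt_length v j (by omega)
          have l2 := delAt_length u j (by omega)
          rw [hc, l2] at l1
          omega
        simp [hde]
      · simp [hjm]
    rw [List.map_congr_left h1, sum_zeros]
    simp [hne]

-- per god g and suspect s:
--   Σ_{i<|g|} count of key_i(g) among s's keys  -  |g|·[s = g]  =  [are_one_char_diff g s]
theorem per_suspect (g s : String) :
    ((List.range g.toList.length).map
        (fun (j : Nat) => ((keysOf s).count (csw_key g (j : Int)) : Int))).sum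
      - (g.toList.length : Int) * (if s = g then 1 else 0)
      = (if are_one_char_diff g s then (1 : Int) else 0) := by
  have hterm : ∀ j ∈ List.range g.toList.length,
      ((keysOf s).count (csw_key g (j : Int)) : Int)
        = if j < s.toList.length ∧ delAt s.toList j = delAt g.toList j then 1 else 0 := by
    intro j _
    rw [keysOf_eq, csw_key_natCast, count_keymap]
    split <;> simp
  rw [List.map_congr_left hterm, pointwise]
  have hif : (if s = g then (1 : Int) else 0) = (if s.toList = g.toList then 1 else 0) := by
    by_cases h : s = g
    · simp [h]
    · rw [if_neg h, if_neg (fun hc => h (String.toList_inj.mp hc))]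
  rw [hif, show (PySem.Str.len s == PySem.Str.len g)
        = (((s.toList.length : Nat) : Int) == ((g.toList.length : Nat) : Int)) from by
      rw [PySem.Str.len_eq, PySem.Str.len_eq]]
  exact del_count_identity g.toList s.toList g.toList.length s.toList.length rfl rfl

-- ---- assembling per god ----

theorem foldl_append_map (f : String → Int) (l : List String) (acc : List Int) :
    l.foldl (fun result god => result ++ [f god]) acc = acc ++ l.map f := by
  induction l generalizing acc with
  | nil => simp
  | cons x xs ih => simp [List.foldl_cons, ih]

theorem per_god (g : String) (suspects : List String) :
    suspects.foldl (fun count suspect => if are_one_char_diff g suspect then count + 1 else count) (0 : Int)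
      = ((PySem.List.pyRange 0 (PySem.Str.len g) 1).foldl
          (fun t i => t + (csw_build suspects).2.getD (csw_key g i) 0) 0)
        - PySem.Str.len g * (csw_build suspects).1.getD g 0 := by
  rw [foldl_count, PySem.List.foldl_add, csw_build_fst]
  simp only [zero_add]
  have hmap : (PySem.List.pyRange 0 (PySem.Str.len g) 1).map
      (fun i => (csw_build suspects).2.getD (csw_key g i) 0)
      = (List.range g.toList.length).map
        (fun (j : Nat) => ((suspects.flatMap keysOf).count (csw_key g (j : Int)) : Int)) := by
    rw [PySem.Str.len_eq, PySem.List.pyRange_zero_natCast, List.map_map]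
    exact List.map_congr_left (fun j _ => by
      simp only [Function.comp]
      rw [csw_build_snd])
  rw [hmap]
  have hcnt : ∀ j ∈ List.range g.toList.length,
      ((suspects.flatMap keysOf).count (csw_key g (j : Int)) : Int)
        = (suspects.map (fun s => ((keysOf s).count (csw_key g (j : Int)) : Int))).sum := by
    intro j _
    exact count_flatMap suspects keysOf _
  rw [List.map_congr_left hcnt, sum_swap_int, count_as_sum suspects g,
    ← List.sum_map_mul_left, ← sum_map_sub_int]
  have hlen : PySem.Str.len g = (g.toList.length : Int) := PySem.Str.len_eq g
  calc (suspects.map (fun s => if are_one_char_diff g s then (1 : Int) else 0)).sum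
      = (suspects.map (fun s =>
          ((List.range g.toList.length).map
            (fun (j : Nat) => ((keysOf s).count (csw_key g (j : Int)) : Int))).sum
          - (g.toList.length : Int) * (if s = g then 1 else 0))).sum := by
        apply congrArg
        apply List.map_congr_left
        intro s _
        exact (per_suspect g s).symm
    _ = _ := by rw [hlen]

-- ===== VERDICT (by name: the statement is the Claim_ definition above) =====
theorem count_suspect_words_spec : Claim_equal_count_suspect_words := by
  intro gods suspects _
  unfold Spec_count_suspect_words count_suspect_words count_suspect_words_alt
  rw [foldl_append_map, foldl_append_map]
  simp only [List.nil_append]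
  apply List.map_congr_left
  intro g _
  exact per_god g suspects
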